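-- pv_equiv track=rewrite | github.com/ryanjmccall/protein-seq-to-func | scripts/reference_scoring.py | _primary_relation
-- ===== SOURCE A (Python) =====
-- def _primary_relation(relations: str | None) -> str | None:
--     if not relations:
--         return None
--     parts = [p.strip().lower() for p in relations.split(";") if p.strip()]
--     if "reference" in parts:
--         return "reference"
--     if "citation" in parts:
--         return "citation"
--     if "seed" in parts:
--         return "seed"
--     return parts[0] if parts else None
-- ===== SOURCE B (Python) =====
-- def _primary_relation(relations: str | None) -> str | None:
--     if not relations:
--         return None
--     rank = {"reference": 0, "citation": 1, "seed": 2}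
--     parts = [p.strip().lower() for p in relations.split(";") if p.strip()]
--     return min(parts, key=lambda q: rank.get(q, 3)) if parts else None
-- ===== Notes on version B (the rewrite author's own statement) =====
-- stated objective: alternative
-- what changed: Replaces the chain of three membership tests with a selection by minimum: each part gets a priority rank from a dict (reference=0, citation=1, seed=2, other=3) and min(parts, key=rank) picks the answer, stability of min giving the first-element fallback.
import Mathlib
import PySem

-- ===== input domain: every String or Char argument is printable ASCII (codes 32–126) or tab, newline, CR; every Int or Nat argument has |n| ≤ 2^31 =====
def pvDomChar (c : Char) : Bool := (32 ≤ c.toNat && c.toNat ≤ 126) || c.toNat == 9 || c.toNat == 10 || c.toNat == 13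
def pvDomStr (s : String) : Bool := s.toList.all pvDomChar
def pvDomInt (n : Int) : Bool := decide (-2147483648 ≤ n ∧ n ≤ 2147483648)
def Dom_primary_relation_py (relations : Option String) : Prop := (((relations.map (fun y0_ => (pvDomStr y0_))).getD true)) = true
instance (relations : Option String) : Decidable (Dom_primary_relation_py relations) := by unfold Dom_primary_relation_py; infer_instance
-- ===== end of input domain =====

-- B replaces the chain of membership tests with a min-by-priority-rank selection
-- (reference=0, citation=1, seed=2, other=3); same return value, alternative algorithm.

-- s.split(";") (sep is non-empty, so Str.split? always returns some)
def pvSplit (s : String) : List String := (PySem.Str.split? s ";").getD []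

-- the normalized parts list (the comprehension both Pythons share)
def pvParts (s : String) : List String :=
  ((pvSplit s).filter (fun p => PySem.Str.strip p ≠ "")).map
    (fun p => PySem.Str.lower (PySem.Str.strip p))

-- ===== PORT A =====
def primary_relation_py (relations : Option String) : Option String :=
  match relations with
  | none => none
  | some s =>
    if s = "" then none
    else
      let parts := pvParts s
      if parts.contains "reference" then some "reference"
      else if parts.contains "citation" then some "citation"
      else if parts.contains "seed" then some "seed"
      else parts.head?

-- ===== PORT B =====
-- rank.get(q, 3) with rank = {"reference": 0, "citation": 1, "seed": 2}
def pvRank (q : String) : Int :=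
  PySem.Dict.getD (PySem.Dict.ofList [("reference", (0 : Int)), ("citation", 1), ("seed", 2)]) q 3

def primary_relation_py_alt (relations : Option String) : Option String :=
  match relations with
  | none => none
  | some s =>
    if s = "" then none
    else
      let parts := pvParts s
      if parts ≠ [] then PySem.List.min? parts pvRank else none

-- ===== PRECONDITION & SPEC =====
def Spec_primary_relation_py (relations : Option String) (out : Option String) : Prop := out = primary_relation_py_alt relations
instance (relations : Option String) (out : Option String) : Decidable (Spec_primary_relation_py relations out) := by unfold Spec_primary_relation_py; infer_instance

-- ===== CLAIM (what is proved, stated in full; the proofs are below) =====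
def Claim_equal_primary_relation_py : Prop := ∀ (relations : Option String), Dom_primary_relation_py relations → Spec_primary_relation_py relations (primary_relation_py relations)

-- ===== LEMMAS AND PROOFS =====

-- the running-minimum fold inside PySem.List.min?, started from a current best m
def pvMinFrom (m : String) (xs : List String) : Option String :=
  xs.foldl (fun acc x =>
    match acc with
    | none => some x
    | some b => if pvRank x < pvRank b then some x else some b) (some m)

lemma pvRank_eq (q : String) :
    pvRank q = if q = "reference" then 0 else if q = "citation" then 1
      else if q = "seed" then 2 else 3 := by
  have hd : (PySem.Dict.ofList [("reference", (0 : Int)), ("citation", 1), ("seed", 2)]) =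
      PySem.Dict.mk [("reference", 0), ("citation", 1), ("seed", 2)] := rfl
  simp only [pvRank, hd, PySem.Dict.getD_eq_get?_getD, PySem.Dict.get?_mk_cons, beq_iff_eq]
  by_cases h1 : q = "reference" <;> by_cases h2 : q = "citation" <;>
    by_cases h3 : q = "seed" <;>
    simp_all [PySem.Dict.get?, eq_comm]

lemma min?_cons_eq_pvMinFrom (m : String) (xs : List String) :
    PySem.List.min? (m :: xs) pvRank = pvMinFrom m xs := by
  unfold PySem.List.min? pvMinFrom
  rw [List.foldl_cons]
  congr 1
  funext acc x
  cases acc <;> rfl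

-- characterization of the running minimum: first keyword by priority, else the seed value m
lemma pvMinFrom_char (xs : List String) (m : String) :
    pvMinFrom m xs = some (
      if m = "reference" ∨ xs.contains "reference" then "reference"
      else if m = "citation" ∨ xs.contains "citation" then "citation"
      else if m = "seed" ∨ xs.contains "seed" then "seed"
      else m) := by
  induction xs generalizing m with
  | nil =>
    simp only [pvMinFrom, List.foldl_nil, List.contains_nil, Option.some.injEq]
    split_ifs <;> simp_all
  | cons y ys ih =>
    have hstep : pvMinFrom m (y :: ys) =
        pvMinFrom (if pvRank y < pvRank m then y else m) ys := by
      simp only [pvMinFrom, List.foldl_cons]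
      split <;> rfl
    rw [hstep, ih]
    simp only [List.contains_cons, pvRank_eq, Bool.or_eq_true, beq_iff_eq,
      Option.some.injEq]
    by_cases hy1 : y = "reference" <;> by_cases hy2 : y = "citation" <;>
      by_cases hy3 : y = "seed" <;>
      by_cases hm1 : m = "reference" <;> by_cases hm2 : m = "citation" <;>
      by_cases hm3 : m = "seed" <;>
      simp_all <;> split_ifs <;> simp_all

-- ===== VERDICT (by name: the statement is the Claim_ definition above) =====
theorem primary_relation_py_spec : Claim_equal_primary_relation_py := by
  intro relations _
  unfold Spec_primary_relation_py primary_relation_py primary_relation_py_alt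
  match relations with
  | none => rfl
  | some s =>
    by_cases hs : s = ""
    · simp [hs]
    · simp only [hs, if_false]
      cases h : pvParts s with
      | nil => simp
      | cons p rest =>
        simp only [ne_eq, reduceCtorEq, not_false_eq_true, if_true,
          min?_cons_eq_pvMinFrom, pvMinFrom_char, List.head?_cons,
          List.contains_cons, Bool.or_eq_true, beq_iff_eq]
        split_ifs <;> simp_all
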